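-- pv_equiv track=rewrite | github.com/jergusadamec/ecg-deep-segmentation | engine/train.py | get_charateristic
-- ===== SOURCE A (Python) =====
-- def get_charateristic(y):
--     Ppos = Qpos = Rpos =Spos = Tpos = 0
--     for i, val in enumerate(y):
--         if val == 1 and y[i-1] == 0:
--             Ppos = i
--         if val == 2 and y[i-1] == 0:
--             Qpos = i
--         if val == 2 and y[i+1] == 3:
--             Rpos = i
--         if val == 3 and y[i+1] == 0:
--             Spos = i
--         if val == 4 and y[i-1] == 0:
--             Tpos = i
--
--     return Ppos, Qpos, Rpos, Spos, Tpos
-- ===== SOURCE B (Python) =====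
-- def get_charateristic(y):
--     # One independent reverse scan per characteristic: the first hit of a
--     # backward scan is the last hit of A's forward loop.
--     n = len(y)
--
--     def last_hit(stop, cond):
--         for i in range(stop, -1, -1):
--             if cond(i):
--                 return i
--         return 0
--
--     Ppos = last_hit(n - 1, lambda i: y[i] == 1 and y[i - 1] == 0)
--     Qpos = last_hit(n - 1, lambda i: y[i] == 2 and y[i - 1] == 0)
--     Rpos = last_hit(n - 2, lambda i: y[i] == 2 and y[i + 1] == 3)
--     Spos = last_hit(n - 2, lambda i: y[i] == 3 and y[i + 1] == 0)
--     Tpos = last_hit(n - 1, lambda i: y[i] == 4 and y[i - 1] == 0)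
--     return Ppos, Qpos, Rpos, Spos, Tpos
-- ===== Notes on version B (the rewrite author's own statement) =====
-- stated objective: alternative
-- what changed: Replaces the single interleaved forward loop carrying five accumulators by five independent backward scans that each break on the first hit (= last forward match of the same condition).
import Mathlib
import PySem

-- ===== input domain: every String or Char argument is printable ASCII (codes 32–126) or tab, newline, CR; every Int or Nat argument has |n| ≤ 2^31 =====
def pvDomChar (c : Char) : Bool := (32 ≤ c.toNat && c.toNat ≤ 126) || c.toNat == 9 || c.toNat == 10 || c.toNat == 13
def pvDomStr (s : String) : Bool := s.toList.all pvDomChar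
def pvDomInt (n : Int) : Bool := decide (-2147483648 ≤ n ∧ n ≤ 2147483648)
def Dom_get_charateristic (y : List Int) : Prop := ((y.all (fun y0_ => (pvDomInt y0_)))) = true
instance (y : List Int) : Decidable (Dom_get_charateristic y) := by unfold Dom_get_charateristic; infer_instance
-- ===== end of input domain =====

-- B replaces A's one interleaved forward loop by five independent backward scans
-- (first backward hit = last forward match); same O(n) cost, different decomposition.

-- ===== PORT A =====
def get_charateristic (y : List Int) : Int × Int × Int × Int × Int :=
  (PySem.List.enumerate y 0).foldl
    (fun st p =>
      ((if p.2 == 1 && PySem.List.pyGet? y (p.1 - 1) == some 0 then p.1 else st.1),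
       (if p.2 == 2 && PySem.List.pyGet? y (p.1 - 1) == some 0 then p.1 else st.2.1),
       (if p.2 == 2 && PySem.List.pyGet? y (p.1 + 1) == some 3 then p.1 else st.2.2.1),
       (if p.2 == 3 && PySem.List.pyGet? y (p.1 + 1) == some 0 then p.1 else st.2.2.2.1),
       (if p.2 == 4 && PySem.List.pyGet? y (p.1 - 1) == some 0 then p.1 else st.2.2.2.2)))
    (0, 0, 0, 0, 0)

-- ===== PORT B =====
-- 'for i in range(stop,-1,-1): if cond(i): return i / return 0'
def lastHit (cond : Int → Bool) : List Int → Int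
  | [] => 0
  | i :: rest => if cond i then i else lastHit cond rest

def get_charateristic_alt (y : List Int) : Int × Int × Int × Int × Int :=
  let n : Int := PySem.List.len y
  let P := lastHit (fun i => PySem.List.pyGet? y i == some 1 && PySem.List.pyGet? y (i - 1) == some 0) (PySem.List.pyRange (n - 1) (-1) (-1))
  let Q := lastHit (fun i => PySem.List.pyGet? y i == some 2 && PySem.List.pyGet? y (i - 1) == some 0) (PySem.List.pyRange (n - 1) (-1) (-1))
  let R := lastHit (fun i => PySem.List.pyGet? y i == some 2 && PySem.List.pyGet? y (i + 1) == some 3) (PySem.List.pyRange (n - 2) (-1) (-1))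
  let S := lastHit (fun i => PySem.List.pyGet? y i == some 3 && PySem.List.pyGet? y (i + 1) == some 0) (PySem.List.pyRange (n - 2) (-1) (-1))
  let T := lastHit (fun i => PySem.List.pyGet? y i == some 4 && PySem.List.pyGet? y (i - 1) == some 0) (PySem.List.pyRange (n - 1) (-1) (-1))
  (P, Q, R, S, T)

-- ===== PRECONDITION & SPEC =====
-- Pre_ excludes exactly the inputs on which A raises IndexError: a non-empty y
-- whose last element is 2 or 3 (there y[i+1] at the last index is out of range).
def Pre_get_charateristic (y : List Int) : Prop :=
  y.getLast? ≠ some 2 ∧ y.getLast? ≠ some 3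
instance (y : List Int) : Decidable (Pre_get_charateristic y) := by unfold Pre_get_charateristic; infer_instance

def pvWitness_get_charateristic : List Int := [0, 1, 0, 2, 3, 0, 4, 0]

def Spec_get_charateristic (y : List Int) (out : Int × Int × Int × Int × Int) : Prop := out = get_charateristic_alt y
instance (y : List Int) (out : Int × Int × Int × Int × Int) : Decidable (Spec_get_charateristic y out) := by unfold Spec_get_charateristic; infer_instance

-- ===== CLAIM (what is proved, stated in full; the proofs are below) =====
def Claim_equal_get_charateristic : Prop := ∀ (y : List Int), Dom_get_charateristic y → Pre_get_charateristic y → Spec_get_charateristic y (get_charateristic y)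

-- ===== LEMMAS AND PROOFS =====

-- the running 'if cond then i else acc' accumulator, one component of A's fold
def lastFold (cond : Int → Bool) (l : List Int) (init : Int) : Int :=
  l.foldl (fun acc i => if cond i then i else acc) init

-- A's quintuple fold splits into five independent component folds
theorem split5 (c1 c2 c3 c4 c5 : Int × Int → Bool) (l : List (Int × Int))
    (a b c d e : Int) :
    l.foldl (fun st p =>
      ((if c1 p then p.1 else st.1), (if c2 p then p.1 else st.2.1),
       (if c3 p then p.1 else st.2.2.1), (if c4 p then p.1 else st.2.2.2.1),
       (if c5 p then p.1 else st.2.2.2.2))) (a, b, c, d, e)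
    = (l.foldl (fun acc p => if c1 p then p.1 else acc) a,
       l.foldl (fun acc p => if c2 p then p.1 else acc) b,
       l.foldl (fun acc p => if c3 p then p.1 else acc) c,
       l.foldl (fun acc p => if c4 p then p.1 else acc) d,
       l.foldl (fun acc p => if c5 p then p.1 else acc) e) := by
  induction l generalizing a b c d e with
  | nil => rfl
  | cons x t ih => simp only [List.foldl_cons]; exact ih _ _ _ _ _

theorem lastFold_eq_find_reverse (cond : Int → Bool) (l : List Int) (init : Int) :
    lastFold cond l init = (l.reverse.find? cond).getD init := by
  induction l generalizing init with
  | nil => rfl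
  | cons x t ih =>
    simp only [lastFold, List.foldl_cons, List.reverse_cons] at *
    rw [ih, List.find?_append]
    cases h : t.reverse.find? cond
    · simp only [Option.none_or]
      by_cases hc : cond x <;> simp [List.find?, hc]
    · simp

theorem lastHit_eq_find (cond : Int → Bool) (l : List Int) :
    lastHit cond l = (l.find? cond).getD 0 := by
  induction l with
  | nil => rfl
  | cons x t ih =>
    by_cases h : cond x <;> simp [lastHit, List.find?, h, ih]

theorem lastHit_reverse_eq_lastFold (cond : Int → Bool) (l : List Int) :
    lastHit cond l.reverse = lastFold cond l 0 := by
  rw [lastHit_eq_find, lastFold_eq_find_reverse]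

-- A's enumerate-fold component = a backward-index scan over pyGet?, for conditions reading y[i-1]
theorem compPrev (y : List Int) (v w : Int) :
    (PySem.List.enumerate y 0).foldl
      (fun acc p => if p.2 == v && PySem.List.pyGet? y (p.1 - 1) == some w then p.1 else acc) 0
    = lastHit (fun i => PySem.List.pyGet? y i == some v && PySem.List.pyGet? y (i - 1) == some w)
        (PySem.List.pyRange (PySem.List.len y - 1) (-1) (-1)) := by
  have hr : PySem.List.pyRange (PySem.List.len y - 1) (-1) (-1)
      = (PySem.List.pyRange 0 (PySem.List.len y) 1).reverse := by
    rw [PySem.List.pyRange_neg_one_eq_reverse, show (-1:Int) + 1 = 0 by norm_num,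
       show PySem.List.len y - 1 + 1 = PySem.List.len y by ring]
  rw [hr, lastHit_reverse_eq_lastFold,
      PySem.List.enumerate_eq_map_pyRange y 0, List.foldl_map]
  apply PySem.List.foldl_congr_mem
  intro acc j hj
  rw [PySem.List.mem_pyRange_one] at hj
  dsimp only
  simp [PySem.List.pyGet?_eq_some_getElem y hj.1 (by simpa using hj.2),
      PySem.List.pyGetD_eq_getElem y 0 hj.1 (by simpa using hj.2)]

-- same for conditions reading y[i+1]: A scans all of range(n), B stops at n-2;
-- at index n-1 the pyGet? (i+1) lookup is none, so that step never fires
theorem compNext (y : List Int) (v w : Int) :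
    (PySem.List.enumerate y 0).foldl
      (fun acc p => if p.2 == v && PySem.List.pyGet? y (p.1 + 1) == some w then p.1 else acc) 0
    = lastHit (fun i => PySem.List.pyGet? y i == some v && PySem.List.pyGet? y (i + 1) == some w)
        (PySem.List.pyRange (PySem.List.len y - 2) (-1) (-1)) := by
  have hr : PySem.List.pyRange (PySem.List.len y - 2) (-1) (-1)
      = (PySem.List.pyRange 0 (PySem.List.len y - 1) 1).reverse := by
    rw [PySem.List.pyRange_neg_one_eq_reverse, show (-1:Int) + 1 = 0 by norm_num,
       show PySem.List.len y - 2 + 1 = PySem.List.len y - 1 by ring]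
  rw [hr, lastHit_reverse_eq_lastFold,
      PySem.List.enumerate_eq_map_pyRange y 0, List.foldl_map]
  have hcong : ∀ (l : List Int), (∀ j ∈ l, 0 ≤ j ∧ j < PySem.List.len y) →
      l.foldl (fun acc j => if (j, PySem.List.pyGetD y j 0).2 == v &&
          PySem.List.pyGet? y ((j, PySem.List.pyGetD y j 0).1 + 1) == some w
          then (j, PySem.List.pyGetD y j 0).1 else acc) 0
      = lastFold (fun i => PySem.List.pyGet? y i == some v && PySem.List.pyGet? y (i + 1) == some w) l 0 := by
    intro l hl
    apply PySem.List.foldl_congr_mem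
    intro acc j hj
    obtain ⟨h0, hn⟩ := hl j hj
    dsimp only
    simp [PySem.List.pyGet?_eq_some_getElem y h0 (by simpa using hn),
        PySem.List.pyGetD_eq_getElem y 0 h0 (by simpa using hn)]
  by_cases hn : PySem.List.len y ≤ 0
  · rw [PySem.List.pyRange_one_eq_nil hn,
        PySem.List.pyRange_one_eq_nil (show PySem.List.len y - 1 ≤ 0 by omega)]
    rfl
  · push Not at hn
    rw [PySem.List.pyRange_one_append 0 (PySem.List.len y - 1) (PySem.List.len y) (by omega) (by omega),
        List.foldl_append]
    have hsing : PySem.List.pyRange (PySem.List.len y - 1) (PySem.List.len y) 1 = [PySem.List.len y - 1] := by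
      have := PySem.List.pyRange_one_singleton (PySem.List.len y - 1)
      rwa [show PySem.List.len y - 1 + 1 = PySem.List.len y by ring] at this
    rw [hsing]
    have hnone : PySem.List.pyGet? y (PySem.List.len y - 1 + 1) = none := by
      rw [PySem.List.pyGet?_eq_none_iff]
      simp [PySem.Raise.InRange, PySem.List.len_eq]
    simp only [List.foldl_cons, List.foldl_nil, hnone]
    rw [if_neg (by simp)]
    exact hcong _ (by intro j hj; rw [PySem.List.mem_pyRange_one] at hj; omega)

theorem get_charateristic_spec : Claim_equal_get_charateristic := by
  intro y _ _
  show get_charateristic y = get_charateristic_alt y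
  unfold get_charateristic get_charateristic_alt
  rw [split5]
  simp only []
  rw [compPrev y 1 0, compPrev y 2 0, compNext y 2 3, compNext y 3 0, compPrev y 4 0]
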